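-- pv_equiv track=rewrite | github.com/mountzou/TwinERGY | determineMetabolic.py | dailyMetabolicTime
-- ===== SOURCE A (Python) =====
-- def dailyMetabolicTime(latest_metabolic):
--     sessions = [[]]
--     sessions_met_time = []
--
--     # Detect each specific session of the last 24 hours
--     for obs, ts in latest_metabolic:
--         if sessions[-1] and obs < sessions[-1][-1][0]:
--             sessions.append([])
--         sessions[-1].append((obs, ts))
--
--     # Specify the metabolic rate and the corresponding timestamp difference of each session
--     for session in sessions:
--         start_ts, start_obs = session[0][1], session[0][0]
--         end_ts, end_obs = session[-1][1], session[-1][0]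
--         sessions_met_time.append([session[0][1], session[-1][1]])
--
--     sessions_met = [t[i] for t in sessions_met_time for i in range(2)]
--
--     return sessions_met
-- ===== SOURCE B (Python) =====
-- def dailyMetabolicTime(latest_metabolic):
--     # One streaming pass: emit [session start ts, session end ts] whenever the
--     # observation drops below the previous one; no nested session lists.
--     (prev_obs, start_ts), rest = latest_metabolic[0], latest_metabolic[1:]
--     prev_ts = start_ts
--     out = []
--     for obs, ts in rest:
--         if obs < prev_obs:
--             out.append(start_ts)
--             out.append(prev_ts)
--             start_ts = ts
--         prev_obs, prev_ts = obs, ts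
--     out.append(start_ts)
--     out.append(prev_ts)
--     return out
-- ===== Notes on version B (the rewrite author's own statement) =====
-- stated objective: simpler
-- what changed: Replaces the nested session-list construction plus a second pass over sessions with a single streaming pass that emits each session's start/end timestamp at every drop boundary.
import Mathlib
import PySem

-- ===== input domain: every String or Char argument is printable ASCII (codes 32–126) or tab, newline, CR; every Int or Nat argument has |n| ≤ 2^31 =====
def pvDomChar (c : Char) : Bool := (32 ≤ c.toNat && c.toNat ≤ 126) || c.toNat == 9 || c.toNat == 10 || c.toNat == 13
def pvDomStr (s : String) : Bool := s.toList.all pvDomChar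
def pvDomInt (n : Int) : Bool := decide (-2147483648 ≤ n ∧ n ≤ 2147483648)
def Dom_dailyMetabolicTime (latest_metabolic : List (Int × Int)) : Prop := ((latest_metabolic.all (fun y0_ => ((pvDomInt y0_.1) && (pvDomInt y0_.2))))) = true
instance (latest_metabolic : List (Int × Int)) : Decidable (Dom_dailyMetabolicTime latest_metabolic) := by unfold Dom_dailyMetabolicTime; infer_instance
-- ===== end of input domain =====

-- B is a single streaming pass emitting boundary timestamps, instead of A's
-- nested session lists plus a second pass; same O(n) cost, simpler shape.

-- ===== PORT A =====
-- the conditional 'sessions.append([])' of the loop body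
def dmtNewSess (sessions : List (List (Int × Int))) (p : Int × Int) : List (List (Int × Int)) :=
  if (PySem.List.pyGetD sessions (-1) []) ≠ [] ∧
     p.1 < (PySem.List.pyGetD (PySem.List.pyGetD sessions (-1) []) (-1) (0, 0)).1
  then sessions ++ [[]] else sessions

-- one loop iteration: maybe open a new session, then append p to the last session
def dmtSessStep (sessions : List (List (Int × Int))) (p : Int × Int) : List (List (Int × Int)) :=
  (dmtNewSess sessions p).dropLast ++ [(PySem.List.pyGetD (dmtNewSess sessions p) (-1) []) ++ [p]]

def dailyMetabolicTime (latest_metabolic : List (Int × Int)) : List Int :=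
  let sessions := latest_metabolic.foldl dmtSessStep [[]]
  let sessions_met_time := sessions.map (fun s =>
    [(PySem.List.pyGetD s 0 (0, 0)).2, (PySem.List.pyGetD s (-1) (0, 0)).2])
  sessions_met_time.flatMap (fun t =>
    (PySem.List.pyRange 0 2 1).map (fun i => PySem.List.pyGetD t i 0))

-- ===== PORT B =====
-- the loop of Source B over the tail, carrying (start_ts, prev_obs, prev_ts)
def dmtGo (start_ts prev_obs prev_ts : Int) : List (Int × Int) → List Int
  | [] => [start_ts, prev_ts]
  | (obs, ts) :: rest =>
      if obs < prev_obs then start_ts :: prev_ts :: dmtGo ts obs ts rest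
      else dmtGo start_ts obs ts rest

def dailyMetabolicTime_alt (latest_metabolic : List (Int × Int)) : List Int :=
  match latest_metabolic with
  | [] => []  -- Python B raises IndexError here (outside Pre_)
  | (obs, ts) :: rest => dmtGo ts obs ts rest

-- ===== PRECONDITION & SPEC =====
-- Pre_ excludes only the empty list, on which A raises IndexError.
def Pre_dailyMetabolicTime (latest_metabolic : List (Int × Int)) : Prop :=
  latest_metabolic ≠ []
instance (latest_metabolic : List (Int × Int)) : Decidable (Pre_dailyMetabolicTime latest_metabolic) := by
  unfold Pre_dailyMetabolicTime; infer_instance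
def pvWitness_dailyMetabolicTime : (List (Int × Int)) := [(3, 10), (5, 11), (2, 12)]

def Spec_dailyMetabolicTime (latest_metabolic : List (Int × Int)) (out : List Int) : Prop := out = dailyMetabolicTime_alt latest_metabolic
instance (latest_metabolic : List (Int × Int)) (out : List Int) : Decidable (Spec_dailyMetabolicTime latest_metabolic out) := by unfold Spec_dailyMetabolicTime; infer_instance

-- ===== CLAIM (what is proved, stated in full; the proofs are below) =====
def Claim_equal_dailyMetabolicTime : Prop := ∀ (latest_metabolic : List (Int × Int)), Dom_dailyMetabolicTime latest_metabolic → Pre_dailyMetabolicTime latest_metabolic → Spec_dailyMetabolicTime latest_metabolic (dailyMetabolicTime latest_metabolic)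

-- ===== LEMMAS AND PROOFS =====

-- the per-session output of A's second pass
def pvF (s : List (Int × Int)) : List Int :=
  [(PySem.List.pyGetD s 0 (0, 0)).2, (PySem.List.pyGetD s (-1) (0, 0)).2]

-- the sessions A's fold builds after the current (nonempty) session cur
def pvSplit (cur : List (Int × Int)) : List (Int × Int) → List (List (Int × Int))
  | [] => [cur]
  | p :: rest =>
      if p.1 < (PySem.List.pyGetD cur (-1) (0, 0)).1 then cur :: pvSplit [p] rest
      else pvSplit (cur ++ [p]) rest

theorem dmt_sing (p : Int × Int) : PySem.List.pyGetD [p] (-1) (0, 0) = p :=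
  PySem.List.pyGetD_neg_one_append_singleton [] p (0, 0)

theorem dmt_fold (rest : List (Int × Int)) :
    ∀ (S : List (List (Int × Int))) (cur : List (Int × Int)), cur ≠ [] →
      rest.foldl dmtSessStep (S ++ [cur]) = S ++ pvSplit cur rest := by
  induction rest with
  | nil => intro S cur _; simp [pvSplit]
  | cons p rest ih =>
    intro S cur hcur
    simp only [List.foldl_cons, pvSplit]
    have hlast : PySem.List.pyGetD (S ++ [cur]) (-1) ([] : List (Int × Int)) = cur :=
      PySem.List.pyGetD_neg_one_append_singleton S cur []
    by_cases h : p.1 < (PySem.List.pyGetD cur (-1) (0, 0)).1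
    · have hn : dmtNewSess (S ++ [cur]) p = (S ++ [cur]) ++ [[]] := by
        unfold dmtNewSess; rw [hlast, if_pos ⟨hcur, h⟩]
      have hstep : dmtSessStep (S ++ [cur]) p = (S ++ [cur]) ++ [[p]] := by
        unfold dmtSessStep
        rw [hn, List.dropLast_concat,
          PySem.List.pyGetD_neg_one_append_singleton (S ++ [cur]) [] [],
          List.nil_append]
      rw [hstep, ih (S ++ [cur]) [p] (by simp), if_pos h, List.append_assoc]
      rfl
    · have hn : dmtNewSess (S ++ [cur]) p = S ++ [cur] := by
        unfold dmtNewSess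
        rw [hlast, if_neg (by intro hc; exact h hc.2)]
      have hstep : dmtSessStep (S ++ [cur]) p = S ++ [cur ++ [p]] := by
        unfold dmtSessStep
        rw [hn, List.dropLast_concat, hlast]
      rw [hstep, ih S (cur ++ [p]) (by simp), if_neg h]

theorem dmt_flat (rest : List (Int × Int)) :
    ∀ (cur : List (Int × Int)), cur ≠ [] →
      (pvSplit cur rest).flatMap pvF =
        dmtGo (PySem.List.pyGetD cur 0 (0, 0)).2
              (PySem.List.pyGetD cur (-1) (0, 0)).1
              (PySem.List.pyGetD cur (-1) (0, 0)).2 rest := by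
  induction rest with
  | nil => intro cur _; simp [pvSplit, pvF, dmtGo]
  | cons p rest ih =>
    intro cur hcur
    obtain ⟨c, cs, rfl⟩ := List.exists_cons_of_ne_nil hcur
    simp only [pvSplit, dmtGo]
    by_cases h : p.1 < (PySem.List.pyGetD (c :: cs) (-1) (0, 0)).1
    · rw [if_pos h, List.flatMap_cons, ih [p] (by simp), if_pos h]
      rw [dmt_sing, PySem.List.pyGetD_zero_cons]
      simp [pvF]
    · rw [if_neg h, ih ((c :: cs) ++ [p]) (by simp), if_neg h]
      have h0 : PySem.List.pyGetD ((c :: cs) ++ [p]) 0 (0, 0) = c := by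
        simp [PySem.List.pyGetD_zero_cons, List.cons_append]
      rw [h0, PySem.List.pyGetD_neg_one_append_singleton,
        PySem.List.pyGetD_zero_cons]

theorem dmt_two (x y : Int) :
    (PySem.List.pyRange 0 2 1).map (fun i => PySem.List.pyGetD [x, y] i 0) = [x, y] := by
  have h2 : PySem.List.pyRange 0 2 1 = [0, 1] := by decide
  rw [h2]
  simp [PySem.List.pyGetD]

-- ===== VERDICT (by name: the statement is the Claim_ definition above) =====
theorem dailyMetabolicTime_spec : Claim_equal_dailyMetabolicTime := by
  intro l _ hpre
  unfold Spec_dailyMetabolicTime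
  obtain ⟨⟨obs, ts⟩, rest, rfl⟩ := List.exists_cons_of_ne_nil hpre
  unfold dailyMetabolicTime dailyMetabolicTime_alt
  have hfirst : dmtSessStep [[]] (obs, ts) = [] ++ [[(obs, ts)]] := by
    have he : PySem.List.pyGetD [[]] (-1) ([] : List (Int × Int)) = [] :=
      PySem.List.pyGetD_neg_one_append_singleton [] [] []
    have hn : dmtNewSess [[]] (obs, ts) = [[]] := by
      unfold dmtNewSess; rw [he, if_neg (by intro hc; exact hc.1 rfl)]
    unfold dmtSessStep
    rw [hn, he]
    rfl
  rw [List.foldl_cons, hfirst, dmt_fold rest [] [(obs, ts)] (by simp)]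
  rw [List.nil_append]
  have : ∀ ss : List (List (Int × Int)),
      (ss.map (fun s =>
        [(PySem.List.pyGetD s 0 (0, 0)).2, (PySem.List.pyGetD s (-1) (0, 0)).2])).flatMap
        (fun t => (PySem.List.pyRange 0 2 1).map (fun i => PySem.List.pyGetD t i 0)) =
      ss.flatMap pvF := by
    intro ss
    rw [List.flatMap_map]
    exact List.flatMap_congr (fun s _ => by rw [dmt_two]; rfl)
  rw [this, dmt_flat rest [(obs, ts)] (by simp), dmt_sing,
    PySem.List.pyGetD_zero_cons]
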